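-- pv_equiv track=rewrite | github.com/APC-SoCIT/APC_2025_2026_T1_SS231_G07-DDC-Management-System | dorotheo-dental-clinic-website/backend/api/services/intent_service.py | _flow_is_terminated
-- ===== SOURCE A (Python) =====
-- def _last_assistant(history: list, n: int = 3) -> list:
--     """Return last n assistant messages (most-recent first)."""
--     return [m['content'] for m in reversed(history or []) if m.get('role') == 'assistant'][:n]
--
-- def _flow_is_terminated(history: list) -> bool:
--     """True if any recent assistant message ended a flow.
--
--     Checks ALL recent assistant messages (not just the very last one)
--     because informational Q&A messages may appear after a flow ends,
--     pushing the [FLOW_COMPLETE] tag out of the last-message position.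
--     """
--     termination_tags = ('[FLOW_COMPLETE]', '[PENDING_BLOCK]', '[APPROVAL_WELCOME]')
--     recent_msgs = _last_assistant(history, 6)
--     if not recent_msgs:
--         return False
--     for msg_content in recent_msgs:
--         if any(tag in msg_content for tag in termination_tags):
--             # Check there's no NEW flow step tag AFTER the termination
--             # (i.e., a new flow was started after the old one ended)
--             for newer_msg in recent_msgs:
--                 if newer_msg == msg_content:
--                     break  # reached the termination tag — no newer flow
--                 if any(t in newer_msg for t in ('[BOOK_STEP_', '[RESCHED_STEP_', '[CANCEL_STEP_')):
--                     return False  # a new flow was started after termination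
--             return True
--     return False
-- ===== SOURCE B (Python) =====
-- def _flow_is_terminated(history: list) -> bool:
--     """One forward pass over the recent assistant messages (most-recent first)."""
--     recent = [m['content'] for m in reversed(history or []) if m.get('role') == 'assistant'][:6]
--     seen_new_flow = False
--     for msg in recent:
--         if any(tag in msg for tag in ('[FLOW_COMPLETE]', '[PENDING_BLOCK]', '[APPROVAL_WELCOME]')):
--             return not seen_new_flow
--         if any(t in msg for t in ('[BOOK_STEP_', '[RESCHED_STEP_', '[CANCEL_STEP_')):
--             seen_new_flow = True
--     return False
-- ===== Notes on version B (the rewrite author's own statement) =====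
-- stated objective: simpler
-- what changed: Replaced the nested outer-find plus inner rescan of recent_msgs with a single forward pass carrying a seen_new_flow flag (termination tag checked before flow-step tag in each message), returning not seen_new_flow at the first termination message.
-- outside the precondition, e.g. on _flow_is_terminated([{'role': 'assistant'}]): A raises KeyError, B raises KeyError
import Mathlib
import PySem

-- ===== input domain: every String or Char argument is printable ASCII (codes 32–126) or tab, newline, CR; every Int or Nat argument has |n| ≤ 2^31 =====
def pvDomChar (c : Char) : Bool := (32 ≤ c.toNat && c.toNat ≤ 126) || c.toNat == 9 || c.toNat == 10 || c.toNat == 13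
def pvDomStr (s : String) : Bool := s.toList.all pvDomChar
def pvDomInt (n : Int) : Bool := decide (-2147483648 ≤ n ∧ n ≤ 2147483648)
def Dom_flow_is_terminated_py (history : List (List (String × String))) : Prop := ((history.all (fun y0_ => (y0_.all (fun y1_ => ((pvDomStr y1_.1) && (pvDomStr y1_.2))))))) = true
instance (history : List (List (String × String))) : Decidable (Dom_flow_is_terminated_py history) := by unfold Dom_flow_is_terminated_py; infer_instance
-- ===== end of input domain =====

-- B replaces A's nested outer-find + inner rescan with a single forward pass
-- carrying a seen_new_flow flag (objective: simpler).

-- ===== PORT A =====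
-- shared literal tag tuples and their membership tests ('tag in msg'), identical in both Pythons
def pvTermTags : List String := ["[FLOW_COMPLETE]", "[PENDING_BLOCK]", "[APPROVAL_WELCOME]"]
def pvFlowTags : List String := ["[BOOK_STEP_", "[RESCHED_STEP_", "[CANCEL_STEP_"]
def pvHasTerm (s : String) : Bool := pvTermTags.any (fun t => PySem.Str.isIn t s)
def pvHasFlow (s : String) : Bool := pvFlowTags.any (fun t => PySem.Str.isIn t s)

-- _last_assistant(history, 6): dict lookups are first-match on the assoc list;
-- m['content'] raises KeyError when absent — Pre_ excludes that, getD "" is unreachable inside Pre_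
def pvLastAssistant (history : List (List (String × String))) : List String :=
  ((history.reverse).filterMap (fun m =>
    if (m.lookup "role") == some "assistant" then some ((m.lookup "content").getD "") else none)).take 6

-- A's inner loop: scan recent_msgs from the front until the termination message itself
def pvInner : List String → String → Bool
  | [], _ => true
  | m :: rest, target =>
      if m == target then true
      else if pvHasFlow m then false
      else pvInner rest target

-- A's outer loop: find the first message carrying a termination tag
def pvOuter : List String → List String → Bool
  | [], _ => false
  | m :: rest, all => if pvHasTerm m then pvInner all m else pvOuter rest all

def flow_is_terminated_py (history : List (List (String × String))) : Bool :=
  let recent := pvLastAssistant history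
  if recent.isEmpty then false else pvOuter recent recent

-- ===== PORT B =====
-- one forward pass with the seen_new_flow accumulator
def pvOnePass : List String → Bool → Bool
  | [], _ => false
  | m :: rest, seen =>
      if pvHasTerm m then !seen
      else if pvHasFlow m then pvOnePass rest true
      else pvOnePass rest seen

def flow_is_terminated_py_alt (history : List (List (String × String))) : Bool :=
  pvOnePass (pvLastAssistant history) false

-- ===== PRECONDITION & SPEC =====
-- Pre_ excludes exactly the inputs where Python raises KeyError: an assistant message without a 'content' key.
def Pre_flow_is_terminated_py (history : List (List (String × String))) : Prop :=
  ∀ m ∈ history, m.lookup "role" = some "assistant" → (m.lookup "content").isSome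

instance (history : List (List (String × String))) : Decidable (Pre_flow_is_terminated_py history) := by
  unfold Pre_flow_is_terminated_py; infer_instance

def pvWitness_flow_is_terminated_py : (List (List (String × String))) :=
  [[("role", "assistant"), ("content", "[FLOW_COMPLETE]")], [("role", "user"), ("content", "hi")]]

def Spec_flow_is_terminated_py (history : List (List (String × String))) (out : Bool) : Prop := out = flow_is_terminated_py_alt history
instance (history : List (List (String × String))) (out : Bool) : Decidable (Spec_flow_is_terminated_py history out) := by unfold Spec_flow_is_terminated_py; infer_instance

-- ===== CLAIM (what is proved, stated in full; the proofs are below) =====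
def Claim_equal_flow_is_terminated_py : Prop := ∀ (history : List (List (String × String))), Dom_flow_is_terminated_py history → Pre_flow_is_terminated_py history → Spec_flow_is_terminated_py history (flow_is_terminated_py history)

-- ===== LEMMAS AND PROOFS =====

-- A's inner rescan over pre ++ target :: rest, when no message of pre carries a termination
-- tag and target does, stops exactly at target and reports whether pre started a new flow.
theorem pvInner_eq (pre : List String) (rest : List String) (target : String)
    (hpre : ∀ m ∈ pre, pvHasTerm m = false) (ht : pvHasTerm target = true) :
    pvInner (pre ++ target :: rest) target = !(pre.any pvHasFlow) := by
  induction pre with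
  | nil => simp [pvInner]
  | cons p pre' ih =>
    have hp : pvHasTerm p = false := hpre p (by simp)
    have hne : (p == target) = false := by
      simp only [beq_eq_false_iff_ne]
      intro h; rw [h] at hp; rw [hp] at ht; cases ht
    simp only [List.cons_append, pvInner, hne, List.any_cons]
    cases hf : pvHasFlow p with
    | true => simp
    | false =>
      simp only [Bool.false_eq_true, if_false, Bool.false_or]
      exact ih (fun m hm => hpre m (by simp [hm]))

-- loop invariant: A's outer loop on the suffix rest of recent = pre ++ rest equals
-- B's one pass on rest with seen = "pre started a new flow"
theorem pvOuter_eq (rest : List String) (pre : List String)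
    (hpre : ∀ m ∈ pre, pvHasTerm m = false) :
    pvOuter rest (pre ++ rest) = pvOnePass rest (pre.any pvHasFlow) := by
  induction rest generalizing pre with
  | nil => simp [pvOuter, pvOnePass]
  | cons m rest' ih =>
    cases hm : pvHasTerm m with
    | true =>
      simp only [pvOuter, pvOnePass, hm, if_true]
      exact pvInner_eq pre rest' m hpre hm
    | false =>
      simp only [pvOuter, pvOnePass, hm, Bool.false_eq_true, if_false]
      have h2 : ∀ x ∈ pre ++ [m], pvHasTerm x = false := by
        intro x hx
        rcases List.mem_append.mp hx with h | h
        · exact hpre x h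
        · simp only [List.mem_singleton] at h; rw [h]; exact hm
      have := ih (pre ++ [m]) h2
      rw [List.append_assoc, List.singleton_append] at this
      rw [this]
      cases hf : pvHasFlow m with
      | true => simp [List.any_append, hf]
      | false => simp [List.any_append, hf]

theorem flow_eq_alt (history : List (List (String × String))) :
    flow_is_terminated_py history = flow_is_terminated_py_alt history := by
  unfold flow_is_terminated_py flow_is_terminated_py_alt
  cases h : pvLastAssistant history with
  | nil => simp [pvOnePass]
  | cons a l =>
    simp only [List.isEmpty_cons, Bool.false_eq_true, if_false]
    have := pvOuter_eq (a :: l) [] (by simp)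
    simpa using this

-- ===== VERDICT (by name: the statement is the Claim_ definition above) =====
theorem flow_is_terminated_py_spec : Claim_equal_flow_is_terminated_py := by
  intro history _ _
  unfold Spec_flow_is_terminated_py
  exact flow_eq_alt history
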